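-- pv_equiv track=rewrite | github.com/ibfzj/topological-kuramoto | core/platonic_solids.py | extract_edges_from_faces
-- ===== SOURCE A (Python) =====
-- def extract_edges_from_faces(faces):
--     """
--     Extract the unique set of edges from a list of polygonal faces.
--
--     Each face is given as a cyclic list of vertex indices.
--     The function enumerates all consecutive vertex pairs (including the closing edge),
--     stores them as sorted tuples (u, v), and removes duplicates.
--
--     Parameters
--     ----------
--     faces : list of list[int]
--         List of polygonal faces, each represented by its ordered vertex indices.
--
--     Returns
--     -------
--     edges : list of list[int]
--         Sorted list of unique undirected edges present in the complex.
--
--     Notes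
--     -----
--     Edge orientation is ignored (stored as sorted vertex pairs).
--     The output is suitable for building the 1-skeleton or incidence matrix B1.
--     """
--
--     edge_set = set()
--     for face in faces:
--         n = len(face)
--         for i in range(n):
--             u, v = face[i], face[(i + 1) % n]
--             edge = tuple(sorted((u, v)))
--             edge_set.add(edge)
--     return sorted([list(e) for e in edge_set])
-- ===== SOURCE B (Python) =====
-- def extract_edges_from_faces(faces):
--     all_edges = []
--     for face in faces:
--         for a, b in zip(face, face[1:] + face[:1]):
--             all_edges.append([a, b] if a <= b else [b, a])
--     all_edges.sort()
--     edges = []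
--     for e in all_edges:
--         if not edges or edges[-1] != e:
--             edges.append(e)
--     return edges
-- ===== Notes on version B (the rewrite author's own statement) =====
-- stated objective: alternative
-- what changed: B generates each face's edges by zipping the face with its rotation into one flat list, then sorts that list once and removes duplicates in a single linear pass over adjacent equals, instead of A's hash-set deduplication followed by sorting the unique edges.
import Mathlib
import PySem

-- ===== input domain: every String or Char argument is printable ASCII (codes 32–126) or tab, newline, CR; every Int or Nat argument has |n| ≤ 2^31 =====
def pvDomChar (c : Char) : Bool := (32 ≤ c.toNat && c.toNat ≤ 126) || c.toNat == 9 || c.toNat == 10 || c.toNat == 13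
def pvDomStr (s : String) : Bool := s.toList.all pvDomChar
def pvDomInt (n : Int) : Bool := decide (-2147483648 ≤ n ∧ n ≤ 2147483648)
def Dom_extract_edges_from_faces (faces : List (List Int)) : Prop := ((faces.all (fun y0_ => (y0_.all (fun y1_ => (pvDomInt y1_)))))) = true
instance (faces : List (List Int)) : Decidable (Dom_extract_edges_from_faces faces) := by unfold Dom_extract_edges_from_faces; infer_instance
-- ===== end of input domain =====

-- B builds one flat list of per-face edges (face zipped with its rotation), sorts it once and drops
-- adjacent duplicates in a single pass, instead of A's set-dedup followed by sorting (alternative decomposition).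


-- ===== PORT A =====
-- literal port of A: fold over faces, inner index loop i in range(len(face)); edge = sorted((u, v))
-- inserted into a Python set; finally sorted([list(e) for e in edge_set]) (list(e) is the identity here,
-- kept as the map; sorting without a key makes the result independent of the set's iteration order).
def extract_edges_from_faces (faces : List (List Int)) : List (List Int) :=
  let edge_set : PySem.Set (List Int) :=
    faces.foldl (fun es face =>
      let n : Int := face.length
      (PySem.List.pyRange 0 n 1).foldl (fun es i =>
        let u := PySem.List.pyGetD face i 0
        let v := PySem.List.pyGetD face (PySem.Int.mod (i + 1) n) 0
        let edge := PySem.List.sorted [u, v] (fun x => x) false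
        PySem.Set.add es edge) es) []
  PySem.List.sorted (edge_set.map (fun e => e)) (fun x => x) false

-- ===== PORT B =====
-- port of B: one flat edge list (face zipped with face[1:] + face[:1]), one sort, one
-- adjacent-duplicate-removing pass.
def extract_edges_from_faces_alt (faces : List (List Int)) : List (List Int) :=
  let all_edges : List (List Int) :=
    faces.foldl (fun acc face =>
      acc ++ (face.zip (PySem.List.slice face (some 1) none ++ PySem.List.slice face none (some 1))).map
        (fun p => if p.1 ≤ p.2 then [p.1, p.2] else [p.2, p.1])) []
  let sorted_edges := PySem.List.sorted all_edges (fun x => x) false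
  sorted_edges.foldl (fun edges e =>
    if edges.isEmpty || edges.getLast? ≠ some e then edges ++ [e] else edges) []

-- ===== PRECONDITION & SPEC =====
def Spec_extract_edges_from_faces (faces : List (List Int)) (out : List (List Int)) : Prop := out = extract_edges_from_faces_alt faces
instance (faces : List (List Int)) (out : List (List Int)) : Decidable (Spec_extract_edges_from_faces faces out) := by unfold Spec_extract_edges_from_faces; infer_instance

-- ===== CLAIM (what is proved, stated in full; the proofs are below) =====
def Claim_equal_extract_edges_from_faces : Prop := ∀ (faces : List (List Int)), Dom_extract_edges_from_faces faces → Spec_extract_edges_from_faces faces (extract_edges_from_faces faces)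

-- ===== LEMMAS AND PROOFS =====

-- sorted over List Int does not depend on which (defeq-propositional) LT/Decidable instances were picked:
-- the ports elaborate with core's List.instLT, the PySem order lemmas with Mathlib's lexicographic LinearOrder
theorem pvSorted_inst (L : List (List Int)) :
    @PySem.List.sorted _ _ List.instLT (fun a b => a.decidableLT b) L (fun x => x) false
      = @PySem.List.sorted _ _ (List.instLinearOrder (α := Int)).toLT
          (List.instLinearOrder (α := Int)).toDecidableLT L (fun x => x) false := by
  rw [@PySem.List.sorted_eq_foldl_insertBy _ _ List.instLT (fun a b => a.decidableLT b) L (fun x => x),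
      @PySem.List.sorted_eq_foldl_insertBy _ _ (List.instLinearOrder (α := Int)).toLT
        (List.instLinearOrder (α := Int)).toDecidableLT L (fun x => x)]
  congr 1
  funext acc x
  congr 1
  funext a b
  exact decide_eq_decide.mpr (List.lt_iff_lex_lt a b)

-- consecutive-duplicate removal, recursively (proof-side model of B's final foldl pass)
def pvCd {α : Type} [DecidableEq α] (l : Option α) : List α → List α
  | [] => []
  | x :: xs => if l = some x then pvCd l xs else x :: pvCd (some x) xs

theorem pvCd_foldl {α : Type} [DecidableEq α] (S : List α) : ∀ acc : List α,
    S.foldl (fun edges e => if edges.isEmpty || edges.getLast? ≠ some e then edges ++ [e] else edges) acc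
      = acc ++ pvCd acc.getLast? S := by
  induction S with
  | nil => intro acc; simp [pvCd]
  | cons x xs ih =>
    intro acc
    simp only [List.foldl_cons]
    by_cases h : acc.getLast? = some x
    · have hne : acc.isEmpty = false := by
        cases acc <;> simp_all
      rw [if_neg (by simp [hne, h]), ih acc, pvCd, if_pos h]
    · rw [if_pos (by simp [h]), ih (acc ++ [x]), pvCd, if_neg h]
      simp

-- on a ≤-sorted list (duplicates adjacent), pvCd yields a strictly increasing list with the same members
theorem pvCd_spec {α : Type} [LinearOrder α] [DecidableEq α] : ∀ (S : List α), S.Pairwise (· ≤ ·) →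
    ∀ l : Option α, (∀ y, l = some y → ∀ b ∈ S, y ≤ b) →
      (pvCd l S).Pairwise (· < ·) ∧ ∀ x, x ∈ pvCd l S ↔ x ∈ S ∧ l ≠ some x := by
  intro S
  induction S with
  | nil => intro _ l _; simp [pvCd]
  | cons x xs ih =>
    intro hS l hl
    rw [List.pairwise_cons] at hS
    obtain ⟨hx, hxs⟩ := hS
    by_cases h : l = some x
    · rw [pvCd, if_pos h]
      obtain ⟨p, m⟩ := ih hxs l (fun y hy b hb => hl y hy b (List.mem_cons_of_mem _ hb))
      refine ⟨p, fun z => ?_⟩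
      rw [m z]
      constructor
      · rintro ⟨hz, hnl⟩; exact ⟨List.mem_cons_of_mem _ hz, hnl⟩
      · rintro ⟨hz, hnl⟩
        rcases List.mem_cons.mp hz with rfl | hz'
        · exact absurd h hnl
        · exact ⟨hz', hnl⟩
    · rw [pvCd, if_neg h]
      obtain ⟨p, m⟩ := ih hxs (some x) (by rintro y rfl' b hb; cases rfl'; exact hx b hb)
      constructor
      · refine List.pairwise_cons.mpr ⟨?_, p⟩
        intro z hz
        rw [m z] at hz
        obtain ⟨hzx, hne⟩ := hz
        exact lt_of_le_of_ne (hx z hzx) (fun he => hne (by rw [he]))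
      · intro z
        simp only [List.mem_cons, m z]
        constructor
        · rintro (rfl | ⟨hz, hne⟩)
          · exact ⟨Or.inl rfl, fun hlz => h hlz⟩
          · refine ⟨Or.inr hz, fun hlz => ?_⟩
            have h1 : z ≤ x := hl z hlz x (List.mem_cons_self)
            have h2 : x ≤ z := hx z hz
            exact h (by rw [hlz, le_antisymm h1 h2])
        · rintro ⟨(rfl | hz), hne⟩
          · exact Or.inl rfl
          · by_cases hzx : z = x
            · exact Or.inl hzx
            · exact Or.inr ⟨hz, fun he => hzx (Option.some_inj.mp he).symm⟩

-- the list of edges a single face contributes, in A's index order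
def pvGen (face : List Int) : List (List Int) :=
  (PySem.List.pyRange 0 (face.length : Int) 1).map (fun i =>
    let u := PySem.List.pyGetD face i 0
    let v := PySem.List.pyGetD face (PySem.Int.mod (i + 1) (face.length : Int)) 0
    PySem.List.sorted [u, v] (fun x => x) false)

theorem pvSortPair (u v : Int) :
    PySem.List.sorted [u, v] (fun x => x) false = if u ≤ v then [u, v] else [v, u] := by
  split
  · exact PySem.List.sorted_eq_self_of_pairwise _ _ (by simp [*])
  · exact PySem.List.sorted_eq_of_perm_of_pairwise_lt _ _ _ (List.Perm.swap _ _ _) (by simp; omega)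

-- zipping a face with its rotation yields exactly A's indexed pairs (face[i], face[(i+1) % n])
theorem pvZipRot (face : List Int) :
    face.zip (face.drop 1 ++ face.take 1)
      = (PySem.List.pyRange 0 (face.length : Int) 1).map (fun i =>
          (PySem.List.pyGetD face i 0,
           PySem.List.pyGetD face (PySem.Int.mod (i + 1) (face.length : Int)) 0)) := by
  rcases face with _ | ⟨a, t⟩
  · simp
  · set face := a :: t with hf
    have hn : 0 < face.length := by simp [hf]
    apply List.ext_getElem
    · simp [PySem.List.length_pyRange_one]
      omega
    · intro i h1 h2
      have hi : i < face.length := by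
        simp [PySem.List.length_pyRange_one] at h2; omega
      rw [List.getElem_zip, List.getElem_map, PySem.List.getElem_pyRange_one]
      have hlt : (i + 1) % face.length < face.length := Nat.mod_lt _ hn
      have hc1 : PySem.List.pyGetD face ((0 : Int) + (i : Int)) 0 = face[i] := by
        rw [show (0 : Int) + (i : Int) = ((i : Nat) : Int) by ring, PySem.List.pyGetD_natCast]
        exact List.getD_eq_getElem _ _ hi
      have hc2 : PySem.List.pyGetD face (PySem.Int.mod ((0 : Int) + (i : Int) + 1) (face.length : Int)) 0
          = face[(i + 1) % face.length] := by
        rw [show ((0 : Int) + (i : Int) + 1) = ((i + 1 : Nat) : Int) by push_cast; ring,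
          PySem.Int.mod_natCast, PySem.List.pyGetD_natCast]
        exact List.getD_eq_getElem _ _ hlt
      rw [hc1, hc2]
      by_cases hcase : i < face.length - 1
      · have hm : (i + 1) % face.length = 1 + i := by
          rw [Nat.mod_eq_of_lt (by omega)]; omega
        rw [List.getElem_append_left (by simp; omega), List.getElem_drop]
        simp only [hm]
      · have hm : (i + 1) % face.length = 0 := by
          rw [show i + 1 = face.length by omega]; exact Nat.mod_self _
        have hz : i - (List.drop 1 face).length = 0 := by simp; omega
        rw [List.getElem_append_right (by simp; omega), List.getElem_take]
        simp only [hm, hz]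

-- A's nested set-building fold is set(flatten of per-face edge lists), then sorted
theorem pvA_eq (faces : List (List Int)) :
    extract_edges_from_faces faces
      = PySem.List.sorted (PySem.Set.ofList (faces.flatMap pvGen)) (fun x => x) false := by
  show PySem.List.sorted ((faces.foldl (fun es face =>
      (PySem.List.pyRange 0 (face.length : Int) 1).foldl (fun es i =>
        PySem.Set.add es (PySem.List.sorted [PySem.List.pyGetD face i 0,
          PySem.List.pyGetD face (PySem.Int.mod (i + 1) (face.length : Int)) 0] (fun x => x) false)) es)
      []).map (fun e => e)) (fun x => x) false = _
  rw [show (fun (es : PySem.Set (List Int)) (face : List Int) =>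
      (PySem.List.pyRange 0 (face.length : Int) 1).foldl (fun es i =>
        PySem.Set.add es (PySem.List.sorted [PySem.List.pyGetD face i 0,
          PySem.List.pyGetD face (PySem.Int.mod (i + 1) (face.length : Int)) 0] (fun x => x) false)) es)
      = (fun es face => (pvGen face).foldl PySem.Set.add es) by
    funext es face
    exact (List.foldl_map).symm]
  rw [← List.foldl_flatMap, ← PySem.Set.ofList_eq_foldl, List.map_id']

-- B's fold-append is the flattened edge list; its dedup pass is pvCd
theorem pvB_eq (faces : List (List Int)) :
    extract_edges_from_faces_alt faces
      = pvCd none (PySem.List.sorted (faces.flatMap pvGen) (fun x => x) false) := by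
  unfold extract_edges_from_faces_alt
  rw [show (fun (acc : List (List Int)) (face : List Int) =>
        acc ++ (face.zip (PySem.List.slice face (some 1) none ++ PySem.List.slice face none (some 1))).map
          (fun p => if p.1 ≤ p.2 then [p.1, p.2] else [p.2, p.1]))
      = (fun acc face => acc ++ pvGen face) by
    funext acc face
    congr 1
    have hs : PySem.List.slice face none (some 1) = face.take 1 := by
      rw [PySem.List.slice_to face (by norm_num)]
      rfl
    rw [PySem.List.slice_from_one, hs]
    have h1 : face.tail = face.drop 1 := (List.drop_one).symm
    rw [h1, pvZipRot, List.map_map]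
    unfold pvGen
    apply List.map_congr_left
    intro i _
    simp only [Function.comp]
    exact (pvSortPair _ _).symm]
  rw [PySem.List.foldl_append_eq_flatMap, List.nil_append, pvCd_foldl]
  simp

-- ===== VERDICT (by name: the statement is the Claim_ definition above) =====
theorem extract_edges_from_faces_spec : Claim_equal_extract_edges_from_faces := by
  intro faces _
  unfold Spec_extract_edges_from_faces
  rw [pvA_eq, pvB_eq]
  rw [pvSorted_inst, pvSorted_inst]
  set L := faces.flatMap pvGen with hL
  have hsp := PySem.List.sorted_pairwise L (fun x => x)
  obtain ⟨hpw, hmem⟩ := pvCd_spec _ hsp none (by intro y h; cases h)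
  refine PySem.List.sorted_eq_of_perm_of_pairwise_lt _ _ _ ?_ hpw
  refine (List.perm_ext_iff_of_nodup (hpw.imp ne_of_lt) (PySem.Set.nodup_ofList L)).mpr ?_
  intro x
  rw [hmem x, PySem.Set.mem_ofList, ← pvSorted_inst]
  simp [PySem.List.mem_sorted]
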